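-- pv_equiv track=rewrite | github.com/ChrisBuilds/terminaltexteffects | terminaltexteffects/effects/effect_synthgrid.py | find_even_gap
-- ===== SOURCE A (Python) =====
-- def find_even_gap(dimension: int) -> int:
--     """Find the closest even gap to 20% of the longest dimension.
--
--     Args:
--         dimension (int): The longest dimension.
--
--     Returns:
--         int: The gap that is closest to 20% of the dimension length.
--
--     """
--     dimension = dimension - 2
--     if dimension <= 0:
--         return 0
--     potential_gaps: list[int] = [i for i in range(dimension, 4, -1) if dimension % i <= 1]
--     if not potential_gaps:
--         return 4
--     return min(potential_gaps, key=lambda x: abs(x - dimension // 5))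
-- ===== SOURCE B (Python) =====
-- def find_even_gap(dimension: int) -> int:
--     d = dimension - 2
--     if d <= 0:
--         return 0
--     gaps = set()
--     for m in (d, d - 1):
--         i = 1
--         while i * i <= m:
--             if m % i == 0:
--                 if i >= 5:
--                     gaps.add(i)
--                 if m // i >= 5:
--                     gaps.add(m // i)
--             i += 1
--     if not gaps:
--         return 4
--     target = d // 5
--     return min(sorted(gaps, reverse=True), key=lambda x: abs(x - target))
-- ===== Notes on version B (the rewrite author's own statement) =====
-- stated objective: faster
-- what changed: A scans every i from dimension-2 down to 5 testing (dimension-2) % i <= 1; B enumerates the divisor pairs of d = dimension-2 and of d-1 up to sqrt(d) and picks the candidate closest to d//5 (ties to the larger) from the descending sorted set.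
import Mathlib
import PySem

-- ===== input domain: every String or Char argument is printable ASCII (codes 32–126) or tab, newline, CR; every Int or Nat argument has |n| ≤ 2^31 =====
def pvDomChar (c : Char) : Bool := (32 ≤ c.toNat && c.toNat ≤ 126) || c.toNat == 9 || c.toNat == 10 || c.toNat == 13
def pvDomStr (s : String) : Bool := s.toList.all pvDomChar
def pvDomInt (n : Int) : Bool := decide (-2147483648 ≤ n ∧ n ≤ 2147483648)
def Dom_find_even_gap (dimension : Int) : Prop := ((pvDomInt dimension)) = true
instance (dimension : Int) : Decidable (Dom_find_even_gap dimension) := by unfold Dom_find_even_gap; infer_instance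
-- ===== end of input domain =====

-- B replaces A's linear scan of range(dimension-2, 4, -1) by an O(√n) enumeration of the
-- divisor pairs of d = dimension-2 and of d-1, sorted descending; same value, faster.

-- ===== PORT A =====
def find_even_gap (dimension : Int) : Int :=
  let d := dimension - 2
  if d ≤ 0 then 0
  else
    let potential_gaps := (PySem.List.pyRange d 4 (-1)).filter (fun i => PySem.Int.mod d i ≤ 1)
    if potential_gaps = [] then 4
    else (PySem.List.min? potential_gaps (fun x => |x - PySem.Int.floordiv d 5|)).getD 0

-- ===== PORT B =====
-- port of Source B's inner `while i * i <= m` loop, collecting the divisor pair (i, m // i) ≥ 5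
-- into the set s; the fuel m.toNat + 1 bounds the loop's iteration count (i climbs past √m ≤ m)
def collectDivs (fuel : Nat) (m : Int) (i : Nat) (s : PySem.Set Int) : PySem.Set Int :=
  match fuel with
  | 0 => s
  | fuel + 1 =>
    if (i : Int) * i ≤ m then
      let s1 := if PySem.Int.mod m i = 0 then
          let s' := if (5:Int) ≤ (i:Int) then PySem.Set.add s (i:Int) else s
          if 5 ≤ PySem.Int.floordiv m i then PySem.Set.add s' (PySem.Int.floordiv m i) else s'
        else s
      collectDivs fuel m (i+1) s1
    else s

def find_even_gap_alt (dimension : Int) : Int :=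
  let d := dimension - 2
  if d ≤ 0 then 0
  else
    let gaps := collectDivs ((d-1).toNat + 1) (d-1) 1 (collectDivs (d.toNat + 1) d 1 PySem.Set.empty)
    if gaps = [] then 4
    else
      let target := PySem.Int.floordiv d 5
      (PySem.List.min? (PySem.List.sorted gaps (fun x => x) true) (fun x => |x - target|)).getD 0

-- ===== PRECONDITION & SPEC =====
def Spec_find_even_gap (dimension : Int) (out : Int) : Prop := out = find_even_gap_alt dimension
instance (dimension : Int) (out : Int) : Decidable (Spec_find_even_gap dimension out) := by unfold Spec_find_even_gap; infer_instance

-- ===== CLAIM (what is proved, stated in full; the proofs are below) =====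
def Claim_equal_find_even_gap : Prop := ∀ (dimension : Int), Dom_find_even_gap dimension → Spec_find_even_gap dimension (find_even_gap dimension)

-- ===== LEMMAS AND PROOFS =====

-- the body of collectDivs's one loop step, named so proofs can rewrite through the `let`
def stepSet (m : Int) (i : Nat) (s : PySem.Set Int) : PySem.Set Int :=
  if PySem.Int.mod m i = 0 then
    let s' := if (5:Int) ≤ (i:Int) then PySem.Set.add s (i:Int) else s
    if 5 ≤ PySem.Int.floordiv m i then PySem.Set.add s' (PySem.Int.floordiv m i) else s'
  else s

theorem collectDivs_succ (fuel : Nat) (m : Int) (i : Nat) (s : PySem.Set Int) :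
    collectDivs (fuel + 1) m i s =
      if (i : Int) * i ≤ m then collectDivs fuel m (i+1) (stepSet m i s) else s := rfl

theorem mem_stepSet (m : Int) (i : Nat) (s : PySem.Set Int) (j : Int) :
    j ∈ stepSet m i s ↔ j ∈ s ∨ (PySem.Int.mod m (i:Int) = 0 ∧
      ((j = (i:Int) ∧ (5:Int) ≤ (i:Int)) ∨ (j = PySem.Int.floordiv m (i:Int) ∧ 5 ≤ PySem.Int.floordiv m (i:Int)))) := by
  unfold stepSet
  split_ifs with h1 h2 h3 h3 <;>
    (try simp only [PySem.Set.mem_add]) <;>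
    constructor <;> intro hh <;> tauto

theorem nodup_stepSet (m : Int) (i : Nat) (s : PySem.Set Int) (hs : s.Nodup) :
    (stepSet m i s).Nodup := by
  unfold stepSet
  split_ifs <;> first
    | exact hs
    | exact PySem.Set.nodup_add _ _ hs
    | exact PySem.Set.nodup_add _ _ (PySem.Set.nodup_add _ _ hs)

-- everything collectDivs returns was in s, or is a divisor of m in [5, m]
theorem collectDivs_sound (m : Int) (fuel : Nat) :
    ∀ (i : Nat) (s : PySem.Set Int) (j : Int), 1 ≤ i →
      j ∈ collectDivs fuel m i s → j ∈ s ∨ (5 ≤ j ∧ j ∣ m ∧ j ≤ m) := by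
  induction fuel with
  | zero => intro i s j _ hj; exact Or.inl hj
  | succ fuel ih =>
    intro i s j hi hj
    rw [collectDivs_succ] at hj
    by_cases hle : (i:Int) * i ≤ m
    · rw [if_pos hle] at hj
      have hipos : (0:Int) < (i:Int) := by exact_mod_cast hi
      have hm1 : (1:Int) ≤ m := le_trans (by nlinarith) hle
      rcases ih (i+1) _ j (by omega) hj with h1 | h1
      · rw [mem_stepSet] at h1
        rcases h1 with h1 | ⟨hmod, hcase⟩
        · exact Or.inl h1
        · right
          rw [PySem.Int.mod_eq_emod_of_pos hipos] at hmod
          have hdvd : (i:Int) ∣ m := Int.dvd_of_emod_eq_zero hmod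
          rcases hcase with ⟨hj1, hj5⟩ | ⟨hj1, hj5⟩
          · exact ⟨by omega, hj1 ▸ hdvd, by subst hj1; nlinarith⟩
          · rw [PySem.Int.floordiv_eq_ediv_of_pos hipos] at hj1 hj5
            refine ⟨by omega, hj1 ▸ ⟨(i:Int), (Int.ediv_mul_cancel hdvd).symm⟩, ?_⟩
            have := Int.ediv_le_self (b := (i:Int)) (by omega : (0:Int) ≤ m)
            omega
      · exact Or.inr h1
    · rw [if_neg hle] at hj
      exact Or.inl hj

-- every divisor of m in [5, m] whose loop index min(j, m/j) is still ahead of i ends up in the result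
theorem collectDivs_complete (m : Int) (fuel : Nat) :
    ∀ (i : Nat) (s : PySem.Set Int) (j : Int), 1 ≤ i → m.toNat + 1 ≤ fuel + i →
      (j ∈ s ∨ (5 ≤ j ∧ j ∣ m ∧ 1 ≤ m ∧ (i:Int) ≤ j ∧ (i:Int) ≤ m / j)) →
      j ∈ collectDivs fuel m i s := by
  induction fuel with
  | zero =>
    intro i s j hi hfuel h
    rcases h with h | ⟨h5, hdvd, hm1, hij, hic⟩
    · exact h
    · exfalso
      have hjpos : (0:Int) < j := by omega
      have him : m < (i:Int) := by omega
      have hmulc : m / j * j = m := Int.ediv_mul_cancel hdvd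
      have h1 : (i:Int) ≤ (m / j) * j := le_trans hic (le_mul_of_one_le_right (by omega) (by omega))
      rw [hmulc] at h1
      omega
  | succ fuel ih =>
    intro i s j hi hfuel h
    rw [collectDivs_succ]
    by_cases hle : (i:Int) * i ≤ m
    · rw [if_pos hle]
      have hipos : (0:Int) < (i:Int) := by exact_mod_cast hi
      apply ih (i+1) _ j (by omega) (by omega)
      rw [mem_stepSet]
      rcases h with h | ⟨h5, hdvd, hm1, hij, hic⟩
      · exact Or.inl (Or.inl h)
      · have hjpos : (0:Int) < j := by omega
        by_cases hnext : ((i:Int)+1 ≤ j ∧ ((i:Int)+1) ≤ m / j)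
        · right
          push_cast
          exact ⟨h5, hdvd, hm1, hnext.1, hnext.2⟩
        · left; right
          have hmulc : m / j * j = m := Int.ediv_mul_cancel hdvd
          have hcdvd : m / j ∣ m := ⟨j, hmulc.symm⟩
          rcases (by omega : (i:Int) = j ∨ (i:Int) = m / j) with he | he
          · refine ⟨by rw [PySem.Int.mod_eq_emod_of_pos hipos, he]; exact Int.emod_eq_zero_of_dvd hdvd, ?_⟩
            exact Or.inl ⟨he.symm, by omega⟩
          · have hfj : PySem.Int.floordiv m (i:Int) = j := by
              have h0 : m / j * j / (m / j) = j := Int.mul_ediv_cancel_left _ (by omega)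
              rw [PySem.Int.floordiv_eq_ediv_of_pos hipos, he]
              nth_rewrite 1 [← hmulc]
              exact h0
            refine ⟨by rw [PySem.Int.mod_eq_emod_of_pos hipos, he]; exact Int.emod_eq_zero_of_dvd hcdvd, ?_⟩
            exact Or.inr ⟨hfj.symm, by rw [hfj]; omega⟩
    · rw [if_neg hle]
      rcases h with h | ⟨h5, hdvd, hm1, hij, hic⟩
      · exact h
      · exfalso
        have hjpos : (0:Int) < j := by omega
        have hmulc : m / j * j = m := Int.ediv_mul_cancel hdvd
        have : (i:Int) * (i:Int) ≤ (m / j) * j :=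
          mul_le_mul hic hij (by omega) (by omega)
        rw [hmulc] at this
        exact hle this

theorem collectDivs_nodup (m : Int) (fuel : Nat) :
    ∀ (i : Nat) (s : PySem.Set Int), s.Nodup → (collectDivs fuel m i s).Nodup := by
  induction fuel with
  | zero => intro i s hs; exact hs
  | succ fuel ih =>
    intro i s hs
    rw [collectDivs_succ]
    by_cases hle : (i:Int) * i ≤ m
    · rw [if_pos hle]
      exact ih (i+1) _ (nodup_stepSet m i s hs)
    · rw [if_neg hle]
      exact hs

-- membership in B's candidate set, with the fuel Source B's driver supplies
theorem mem_collectDivs_one (m : Int) (hm : 1 ≤ m) (s : PySem.Set Int) (j : Int) :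
    j ∈ collectDivs (m.toNat + 1) m 1 s ↔ j ∈ s ∨ (5 ≤ j ∧ j ∣ m) := by
  constructor
  · intro h
    rcases collectDivs_sound m _ 1 s j le_rfl h with h | ⟨h5, hd, _⟩
    · exact Or.inl h
    · exact Or.inr ⟨h5, hd⟩
  · intro h
    apply collectDivs_complete m _ 1 s j le_rfl (by omega)
    rcases h with h | ⟨h5, hd⟩
    · exact Or.inl h
    · right
      have hj : (0:Int) < j := by omega
      have hle := Int.le_of_dvd (by omega) hd
      have h1 : (1:Int) ≤ m / j := by
        rw [Int.le_ediv_iff_mul_le hj]; omega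
      exact ⟨h5, hd, hm, by push_cast; omega, by push_cast; omega⟩

-- "dimension % i <= 1" on (4, dimension] is exactly "i divides dimension or dimension - 1"
theorem mod_le_one_char (d j : Int) (hd : 5 ≤ d) :
    (4 < j ∧ j ≤ d ∧ PySem.Int.mod d j ≤ 1) ↔ (5 ≤ j ∧ (j ∣ d ∨ j ∣ (d-1))) := by
  constructor
  · rintro ⟨h4, hle, hmod⟩
    have hj : (0:Int) < j := by omega
    rw [PySem.Int.mod_eq_emod_of_pos hj] at hmod
    have h0 := Int.emod_nonneg d (ne_of_gt hj)
    refine ⟨by omega, ?_⟩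
    rcases (by omega : d % j = 0 ∨ d % j = 1) with h | h
    · exact Or.inl (Int.dvd_of_emod_eq_zero h)
    · right
      have := Int.mul_ediv_add_emod d j
      exact ⟨d / j, by omega⟩
  · rintro ⟨h5, hd1 | hd1⟩
    · have hj : (0:Int) < j := by omega
      have hle := Int.le_of_dvd (by omega) hd1
      refine ⟨by omega, hle, ?_⟩
      rw [PySem.Int.mod_eq_emod_of_pos hj, Int.emod_eq_zero_of_dvd hd1]
      omega
    · have hj : (0:Int) < j := by omega
      have hle := Int.le_of_dvd (by omega : (0:Int) < d - 1) hd1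
      refine ⟨by omega, by omega, ?_⟩
      rw [PySem.Int.mod_eq_emod_of_pos hj]
      have h1 : (d-1) % j = 0 := Int.emod_eq_zero_of_dvd hd1
      have h2 : d % j = ((d-1) % j + 1 % j) % j := by
        rw [← Int.add_emod]; norm_num
      have e1 : (1:Int) % j = 1 := Int.emod_eq_of_lt (by omega) (by omega)
      rw [h2, h1]
      norm_num [e1]

theorem gaps_pairwise (d : Int) :
    ((PySem.List.pyRange d 4 (-1)).filter (fun i => PySem.Int.mod d i ≤ 1)).Pairwise (· > ·) := by
  apply List.Pairwise.filter
  rw [PySem.List.pyRange_neg_one_eq_reverse, List.pairwise_reverse]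
  exact PySem.List.pairwise_lt_pyRange_one _ _

theorem mem_gaps (d j : Int) :
    j ∈ (PySem.List.pyRange d 4 (-1)).filter (fun i => PySem.Int.mod d i ≤ 1) ↔
    (4 < j ∧ j ≤ d ∧ PySem.Int.mod d j ≤ 1) := by
  simp [List.mem_filter, PySem.List.mem_pyRange_neg_one, and_assoc]

theorem find_even_gap_eq_alt (dimension : Int) :
    find_even_gap dimension = find_even_gap_alt dimension := by
  unfold find_even_gap find_even_gap_alt
  by_cases hd0 : dimension - 2 ≤ 0
  · simp [hd0]
  simp only [if_neg hd0]
  set d := dimension - 2 with hd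
  have hdpos : 0 < d := by omega
  set gaps := (PySem.List.pyRange d 4 (-1)).filter (fun i => PySem.Int.mod d i ≤ 1) with hgaps
  set cands := collectDivs ((d-1).toNat + 1) (d-1) 1 (collectDivs (d.toNat + 1) d 1 PySem.Set.empty) with hcands
  by_cases hd4 : d ≤ 4
  · -- both candidate lists are empty: both return 4
    have hg : gaps = [] := by
      rw [hgaps, PySem.List.pyRange_neg_one_eq_nil hd4]
      rfl
    have hc : cands = [] := by
      rw [List.eq_nil_iff_forall_not_mem]
      intro j hj
      rcases collectDivs_sound (d-1) _ 1 _ j le_rfl hj with h | ⟨h5, _, hle⟩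
      · rcases collectDivs_sound d _ 1 _ j le_rfl h with h' | ⟨h5, _, hle⟩
        · simp [PySem.Set.empty] at h'
        · omega
      · omega
    rw [hg, hc]
    simp
  · -- d ≥ 5 : the two candidate lists coincide
    have hd5 : 5 ≤ d := by omega
    have hmemc : ∀ j, j ∈ cands ↔ (5 ≤ j ∧ (j ∣ d ∨ j ∣ (d-1))) := by
      intro j
      rw [hcands, mem_collectDivs_one (d-1) (by omega),
        mem_collectDivs_one d (by omega)]
      constructor
      · rintro ((h | ⟨h5, h⟩) | ⟨h5, h⟩)
        · simp [PySem.Set.empty] at h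
        · exact ⟨h5, Or.inl h⟩
        · exact ⟨h5, Or.inr h⟩
      · rintro ⟨h5, h | h⟩
        · exact Or.inl (Or.inr ⟨h5, h⟩)
        · exact Or.inr ⟨h5, h⟩
    have hgp : gaps.Pairwise (· > ·) := hgaps ▸ gaps_pairwise d
    have hgnd : gaps.Nodup := hgp.imp (fun h => ne_of_gt h)
    have hcnd : cands.Nodup :=
      collectDivs_nodup _ _ _ _ (collectDivs_nodup _ _ _ _ List.nodup_nil)
    have hperm : gaps.Perm cands := by
      rw [List.perm_ext_iff_of_nodup hgnd hcnd]
      intro j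
      rw [hgaps, mem_gaps, hmemc]
      exact mod_le_one_char d j hd5
    have hsorted : PySem.List.sorted cands (fun x => x) true = gaps :=
      PySem.List.sorted_rev_eq_of_perm_of_pairwise_gt cands gaps _ hperm hgp
    have hgne : gaps ≠ [] := by
      intro h
      have : d ∈ gaps := by
        rw [hgaps, mem_gaps]
        refine ⟨by omega, le_rfl, ?_⟩
        rw [PySem.Int.mod_eq_emod_of_pos (by omega), Int.emod_self]
        omega
      rw [h] at this
      exact List.not_mem_nil this
    have hcne : cands ≠ [] := by
      intro h
      rw [h] at hsorted
      exact hgne (by simpa using hsorted.symm)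
    rw [if_neg hgne, if_neg hcne, hsorted]

-- ===== VERDICT (by name: the statement is the Claim_ definition above) =====
theorem find_even_gap_spec : Claim_equal_find_even_gap := by
  intro dimension _
  unfold Spec_find_even_gap
  exact find_even_gap_eq_alt dimension
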